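/- HAND-WRITTEN (farm/mkstatement.py generates `Calls` statements only; `_start` is not a function).
   THE STATEMENT of the proof unit `_start`: the stub of the base image (13 instructions, c/base/start.S) reaches `prog_exit` from a
   start state, given the contracts of its two callees. `prog_main` is a client of the heap: its contract's ghosts are the heap `H`,
   the other live objects `rest` and the protected frames.

   WHY THIS IS NOT `ProgX.Top.StubReaches`: giflib READS INITIALISED DATA OF THE IMAGE — `CodeMasks`, `InterlacedOffset`,
   `InterlacedJumps` (.rodata at 141300H … 14139AH) — and the safety argument needs their VALUES (`Gif.Spec.Consts`: a code is masked
   with `CodeMasks[RunningBits] ≤ FFFH`; the interlace loop starts at a non-negative row and advances). `Top.StartOK` /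
   `Top.MainPre` say nothing about the contents of the image's data (the toys never read any), so the generic
   `ProgX.Base.Top.stub_reaches` cannot give `prog_main` its precondition. Here the start state's `Consts` is ONE MORE HYPOTHESIS of the
   stub's statement (at the start state it is a closed fact about the file's bytes: Gif/Final.lean `consts_start`), and the unit's
   proof carries it over `run_ctors` (which writes 32 bytes of stack and shadow bytes) to `prog_main`'s entry. The proof is the
   generic stub's (ProgX/Base/Spec/Stub.lean `Top.stub_reaches`) with that one clause added.
   What the names mean: ProgX/Top.lean (`Top.StartOK`), ProgX/Base/Spec/Basic.lean, Gif/Spec/Common.lean (`Consts`).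
   The theorem to prove: `theorem start_ok : Gif.Spec.start.Statement`. -/
import ProgX.Top
import ProgX.Base.Spec.Stub
import Gif.Spec.Driver
namespace Gif.Spec.start
open X86 X86.User Asan

/-- **The statement of the stub, with the image's constants**: from a state `StartOK … len u` whose text is that of the reference
state AND in which the image's constants have their values, the machine reaches `exit`, through states that are not at
`__asan_report` and are inside the text window. -/
def StubReaches (Lay : Layout) (μ : Microarch) (u₀ : State) : Prop :=
  ∀ (len : Nat) (u : State),
    ProgX.Top.StartOK Gif.Spec.rt ProgX.Base.L._start.entry Gif.Globals.objs len u →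
    Gif.Spec.Consts u.mem →
    ProgX.CodeOK ProgX.Base.T u₀ u.mem →
    ReachVia Lay μ (ProgX.WayInv ProgX.Base.T) u (fun v => v.rip = ProgX.Base.L.exit)

/-- The statement of unit `_start`. -/
def Statement : Prop :=
  ∀ (Lay : Layout) (_hLay : Lay.hi = 0x1000000) (μ : Microarch) (_hμ : UserX.MicroOK μ) (u₀ : State)
    (_hcode : HasCodeNat Lay u₀ ProgX.Base.L._start.entry ProgX.Base.Code.code__start.nat ProgX.Base.L._start.size)
    (_h_run_ctors : Calls Lay μ ProgX.Base.WayInv (ProgX.Base.conv u₀) ProgX.Base.L.run_ctors.entry (Asan.runCtorsSpec Gif.Spec.rt))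
    (_h_prog_main : ∀ (H : Heap) (rest : List Obj) (frames : List (Nat × FrameLayout)), Calls Lay μ ProgX.Base.WayInv (ProgX.Base.conv u₀) Gif.L.prog_main.entry (Gif.Spec.prog_main.spec H rest frames)),
    StubReaches Lay μ u₀

end Gif.Spec.start
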